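-- pv_equiv track=rewrite | github.com/pmonnin/fca-ontology-checking | src/core/statistics/ContextStatistics.py | compute_3d_context_statistics
-- ===== SOURCE A (Python) =====
-- def compute_3d_context_statistics(context):
--     statistics = {"objects-number": len(context), "relations-number": 0}
--
--     attributes = []
--     conditions = []
--     hidden_objects = {}
--
--     for obj in context.keys():
--         if len(context[obj].keys()) == 0:
--             hidden_objects[obj] = True
--
--         for attribute in context[obj].keys():
--             if attribute not in attributes:
--                 attributes.append(attribute)
--
--             if len(context[obj][attribute]) == 0:
--                 hidden_objects[obj] = True
--
--             for condition in context[obj][attribute]: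
--                 if condition not in conditions:
--                     conditions.append(condition)
--
--             statistics["relations-number"] += len(context[obj][attribute])
--
--     statistics["attributes-number"] = len(attributes)
--     statistics["conditions-number"] = len(conditions)
--     statistics["hidden-objects-count"] = len(hidden_objects)
--     return statistics
-- ===== SOURCE B (Python) =====
-- def _distinct_count(items):
--     # sort-then-scan distinct counting: equal values end up adjacent,
--     # so distinct = 1 + number of adjacent unequal pairs
--     xs = sorted(items)
--     if not xs:
--         return 0
--     return 1 + sum(1 for prev, cur in zip(xs, xs[1:]) if prev != cur)
--
--
-- def compute_3d_context_statistics(context):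
--     # flatten the nested dict once into a table of (attribute, condition-list) rows
--     pairs = [(a, cs) for attrs in context.values() for a, cs in attrs.items()]
--     return {
--         "objects-number": len(context),
--         "relations-number": sum(len(cs) for _, cs in pairs),
--         "attributes-number": _distinct_count([a for a, _ in pairs]),
--         "conditions-number": _distinct_count([c for _, cs in pairs for c in cs]),
--         "hidden-objects-count": sum(1 for attrs in context.values()
--                                     if not attrs or any(not cs for cs in attrs.values())),
--     }
-- ===== Notes on version B (the rewrite author's own statement) =====
-- stated objective: faster
-- what changed: Replaces A's single interleaved triple-nested loop threading four accumulators (two list-membership dedup lists, a flag dict, a counter) with a flatten-first pipeline: the nested dict is flattened once into a table of (attribute, condition-list) rows, relations come from a sum over that table, distinct attributes and conditions are counted by sort-then-adjacent-scan instead of membership tests, and hidden objects by one filtered count; Pre_ only excludes association lists with duplicate object keys, which do not represent any Python dict.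
import Mathlib
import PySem

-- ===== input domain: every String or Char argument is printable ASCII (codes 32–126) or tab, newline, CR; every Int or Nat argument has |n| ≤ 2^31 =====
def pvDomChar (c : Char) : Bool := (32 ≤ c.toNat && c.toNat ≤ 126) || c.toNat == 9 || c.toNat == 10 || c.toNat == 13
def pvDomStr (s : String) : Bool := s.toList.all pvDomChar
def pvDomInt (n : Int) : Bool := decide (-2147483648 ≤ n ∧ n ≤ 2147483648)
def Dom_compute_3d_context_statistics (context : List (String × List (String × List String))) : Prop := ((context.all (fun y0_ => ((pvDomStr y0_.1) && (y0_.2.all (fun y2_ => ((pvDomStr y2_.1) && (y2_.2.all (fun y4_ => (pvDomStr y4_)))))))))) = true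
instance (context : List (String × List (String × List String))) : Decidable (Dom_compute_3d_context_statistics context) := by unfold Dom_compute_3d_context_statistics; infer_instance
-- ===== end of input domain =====

-- B flattens the nested dict into a table of (attribute, condition-list) rows once and derives each
-- statistic by its own pass, counting distinct attributes/conditions by sort-then-adjacent-scan instead
-- of A's interleaved triple-nested loop with list-membership dedup (objective: faster, measured).

-- ===== PORT A =====
-- One combined fold over the dict's items, carrying (relations, attributes-list, conditions-list, hidden-objects dict),
-- exactly as A's nested loops do ('for obj in context.keys(): … context[obj]' iterates the items of the dict in order).
def compute_3d_context_statistics (context : List (String × List (String × List String))) : List (String × Int) :=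
  let final := context.foldl (fun (st : Int × List String × List String × PySem.Dict String Bool) p =>
    -- if len(context[obj].keys()) == 0: hidden_objects[obj] = True
    let hidden1 := if p.2.length = 0 then st.2.2.2.insert p.1 true else st.2.2.2
    p.2.foldl (fun (st : Int × List String × List String × PySem.Dict String Bool) q =>
      -- if attribute not in attributes: attributes.append(attribute)
      let attrs1 := if q.1 ∈ st.2.1 then st.2.1 else st.2.1 ++ [q.1]
      -- if len(context[obj][attribute]) == 0: hidden_objects[obj] = True
      let hidden2 := if q.2.length = 0 then st.2.2.2.insert p.1 true else st.2.2.2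
      -- for condition in …: if condition not in conditions: conditions.append(condition)
      let conds1 := q.2.foldl (fun cs c => if c ∈ cs then cs else cs ++ [c]) st.2.2.1
      -- statistics["relations-number"] += len(context[obj][attribute])
      (st.1 + (q.2.length : Int), attrs1, conds1, hidden2))
      (st.1, st.2.1, st.2.2.1, hidden1))
    ((0 : Int), ([] : List String), ([] : List String), (PySem.Dict.empty : PySem.Dict String Bool))
  [("objects-number", (context.length : Int)),
   ("relations-number", final.1),
   ("attributes-number", (final.2.1.length : Int)),
   ("conditions-number", (final.2.2.1.length : Int)),
   ("hidden-objects-count", (final.2.2.2.size : Int))]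

-- ===== PORT B =====
-- sorted(items) then 1 + number of adjacent unequal pairs ('sum(1 for … in zip(xs, xs[1:]) if prev != cur)' is countP on the zip)
def pvDistinctCount (items : List String) : Int :=
  let xs := PySem.List.sorted items (fun x => x) false
  if xs.isEmpty then 0
  else 1 + ((xs.zip (xs.drop 1)).countP (fun p => p.1 != p.2) : Int)

def compute_3d_context_statistics_alt (context : List (String × List (String × List String))) : List (String × Int) :=
  -- pairs = [(a, cs) for attrs in context.values() for a, cs in attrs.items()]
  let pairs := context.flatMap (fun p => p.2)
  [("objects-number", (context.length : Int)),
   -- sum(len(cs) for _, cs in pairs)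
   ("relations-number", (pairs.map (fun q => (q.2.length : Int))).sum),
   ("attributes-number", pvDistinctCount (pairs.map (fun q => q.1))),
   ("conditions-number", pvDistinctCount (pairs.flatMap (fun q => q.2))),
   -- sum(1 for attrs in context.values() if not attrs or any(not cs for cs in attrs.values()))
   ("hidden-objects-count", ((context.countP (fun p => p.2.isEmpty || p.2.any (fun q => q.2.isEmpty))) : Int))]

-- ===== PRECONDITION & SPEC =====
-- Pre_ excludes association lists with a repeated object key: such a list does not represent any Python
-- dict (Python dict keys are unique), so neither program's behaviour there is specified by the source.
def Pre_compute_3d_context_statistics (context : List (String × List (String × List String))) : Prop :=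
  (context.map Prod.fst).Nodup
instance (context : List (String × List (String × List String))) : Decidable (Pre_compute_3d_context_statistics context) := by unfold Pre_compute_3d_context_statistics; infer_instance
def pvWitness_compute_3d_context_statistics : (List (String × List (String × List String))) :=
  [("o1", [("a", ["c1", "c2"]), ("b", [])]), ("o2", [])]
def Spec_compute_3d_context_statistics (context : List (String × List (String × List String))) (out : List (String × Int)) : Prop := out = compute_3d_context_statistics_alt context
instance (context : List (String × List (String × List String))) (out : List (String × Int)) : Decidable (Spec_compute_3d_context_statistics context out) := by unfold Spec_compute_3d_context_statistics; infer_instance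

-- ===== CLAIM (what is proved, stated in full; the proofs are below) =====
def Claim_equal_compute_3d_context_statistics : Prop := ∀ (context : List (String × List (String × List String))), Dom_compute_3d_context_statistics context → Pre_compute_3d_context_statistics context → Spec_compute_3d_context_statistics context (compute_3d_context_statistics context)

-- ===== LEMMAS AND PROOFS =====

-- the element-wise dedup loop of A is Set.add folded
theorem pv_dedup_eq_add (cs : List String) (s : List String) :
    cs.foldl (fun cs c => if c ∈ cs then cs else cs ++ [c]) s = cs.foldl PySem.Set.add s := by
  induction cs generalizing s with
  | nil => rfl
  | cons c cs ih => simp only [List.foldl_cons, PySem.Set.add_eq_ite]; exact ih _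

-- A's inner loop over one object's attribute dict, all four components characterised at once
theorem pv_inner (obj : String) (omap : List (String × List String)) :
    ∀ (rel : Int) (attrs conds : List String) (h : PySem.Dict String Bool) (b : Bool),
    omap.foldl (fun (st : Int × List String × List String × PySem.Dict String Bool) q =>
        (st.1 + (q.2.length : Int),
         (if q.1 ∈ st.2.1 then st.2.1 else st.2.1 ++ [q.1]),
         q.2.foldl (fun cs c => if c ∈ cs then cs else cs ++ [c]) st.2.2.1,
         (if q.2.length = 0 then st.2.2.2.insert obj true else st.2.2.2)))
      (rel, attrs, conds, if b then h.insert obj true else h) =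
    (rel + (omap.map (fun q => (q.2.length : Int))).sum,
     omap.foldl (fun s q => PySem.Set.add s q.1) attrs,
     omap.foldl (fun s q => q.2.foldl PySem.Set.add s) conds,
     if b || omap.any (fun q => q.2.isEmpty) then h.insert obj true else h) := by
  induction omap with
  | nil => intro rel attrs conds h b; simp
  | cons q omap ih =>
    intro rel attrs conds h b
    simp only [List.foldl_cons, List.map_cons, List.sum_cons, List.any_cons]
    have hhid : (if q.2.length = 0 then (if b then h.insert obj true else h).insert obj true
                 else (if b then h.insert obj true else h))
        = if (b || q.2.isEmpty) then h.insert obj true else h := by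
      cases b <;> cases q.2 <;> simp [PySem.Dict.insert_insert_self]
    rw [hhid, pv_dedup_eq_add, ih _ _ _ _ (b || q.2.isEmpty)]
    simp only [PySem.Set.add_eq_ite, Bool.or_assoc, add_assoc]
    rfl

-- A's outer loop splits into four independent accumulations
theorem pv_outer (l : List (String × List (String × List String))) :
    ∀ (rel : Int) (attrs conds : List String) (h : PySem.Dict String Bool),
    l.foldl (fun (st : Int × List String × List String × PySem.Dict String Bool) p =>
        let hidden1 := if p.2.length = 0 then st.2.2.2.insert p.1 true else st.2.2.2
        p.2.foldl (fun (st : Int × List String × List String × PySem.Dict String Bool) q =>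
          (st.1 + (q.2.length : Int),
           (if q.1 ∈ st.2.1 then st.2.1 else st.2.1 ++ [q.1]),
           q.2.foldl (fun cs c => if c ∈ cs then cs else cs ++ [c]) st.2.2.1,
           (if q.2.length = 0 then st.2.2.2.insert p.1 true else st.2.2.2)))
          (st.1, st.2.1, st.2.2.1, hidden1))
      (rel, attrs, conds, h) =
    (rel + (l.map (fun p => (p.2.map (fun q => (q.2.length : Int))).sum)).sum,
     l.foldl (fun s p => p.2.foldl (fun s q => PySem.Set.add s q.1) s) attrs,
     l.foldl (fun s p => p.2.foldl (fun s q => q.2.foldl PySem.Set.add s) s) conds,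
     l.foldl (fun d p => if p.2.isEmpty || p.2.any (fun q => q.2.isEmpty) then d.insert p.1 true else d) h) := by
  induction l with
  | nil => intro rel attrs conds h; simp
  | cons p l ih =>
    intro rel attrs conds h
    simp only [List.foldl_cons, List.map_cons, List.sum_cons]
    have h1 : (if p.2.length = 0 then h.insert p.1 true else h)
        = if p.2.isEmpty then h.insert p.1 true else h := by cases p.2 <;> simp
    rw [h1, pv_inner p.1 p.2 rel attrs conds h p.2.isEmpty, ih]
    simp only [add_assoc]

-- the size of the flag dict built over distinct fresh keys is the number of flagged entries
theorem pv_hidden_size (l : List (String × List (String × List String))) :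
    ∀ (d : PySem.Dict String Bool),
    (∀ p ∈ l, d.contains p.1 = false) → (l.map Prod.fst).Nodup →
    (l.foldl (fun d p => if p.2.isEmpty || p.2.any (fun q => q.2.isEmpty) then d.insert p.1 true else d) d).size
      = d.size + (l.filter (fun p => p.2.isEmpty || p.2.any (fun q => q.2.isEmpty))).length := by
  induction l with
  | nil => intro d _ _; simp
  | cons p l ih =>
    intro d hfresh hnd
    simp only [List.map_cons, List.nodup_cons] at hnd
    simp only [List.foldl_cons, List.filter_cons]
    by_cases hp : (p.2.isEmpty || p.2.any (fun q => q.2.isEmpty)) = true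
    · have hfresh' : ∀ q ∈ l, (d.insert p.1 true).contains q.1 = false := by
        intro q hq
        rw [PySem.Dict.contains_insert]
        have hne : q.1 ≠ p.1 := by
          intro he; exact hnd.1 (by rw [← he]; exact List.mem_map_of_mem hq)
        simp [hne, hfresh q (List.mem_cons_of_mem _ hq)]
      have hsz : (d.insert p.1 true).size = d.size + 1 := by
        rw [PySem.Dict.size_insert, if_neg (by simp [hfresh p (by simp)])]
      rw [if_pos hp, if_pos hp, ih _ hfresh' hnd.2, hsz, List.length_cons]
      omega
    · rw [if_neg hp, if_neg hp, ih d (fun q hq => hfresh q (List.mem_cons_of_mem _ hq)) hnd.2]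

-- the first-occurrence dedup of xs has as many elements as xs has distinct values
theorem pv_ofList_length (xs : List String) :
    (PySem.Set.ofList xs).length = xs.toFinset.card := by
  have hperm : (PySem.Set.ofList xs).Perm xs.dedup :=
    (List.perm_ext_iff_of_nodup (PySem.Set.nodup_ofList xs) (List.nodup_dedup xs)).mpr
      (fun a => by simp [PySem.Set.mem_ofList, List.mem_dedup])
  rw [hperm.length_eq, List.card_toFinset]

-- on an ascending list, 1 + number of adjacent unequal pairs = number of distinct values
theorem pv_chain_count (s : List String) (hs : s.Pairwise (· ≤ ·)) :
    (if s.isEmpty then (0 : Int) else 1 + ((s.zip (s.drop 1)).countP (fun p => p.1 != p.2) : Int))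
      = (s.toFinset.card : Int) := by
  induction s with
  | nil => simp
  | cons x t ih =>
    cases t with
    | nil => simp
    | cons y u =>
      have hxy : x ≤ y := (List.pairwise_cons.mp hs).1 y (by simp)
      have hyu : ∀ z ∈ u, y ≤ z := fun z hz =>
        (List.pairwise_cons.mp (List.pairwise_cons.mp hs).2).1 z hz
      have ih' := ih (List.pairwise_cons.mp hs).2
      simp only [List.isEmpty_cons, List.drop_succ_cons, List.drop_zero,
        List.zip_cons_cons, List.countP_cons] at ih' ⊢
      by_cases hne : x = y
      · subst hne
        have : (x :: x :: u).toFinset = (x :: u).toFinset := by simp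
        rw [this]
        simpa using ih'
      · have hnotmem : x ∉ (y :: u).toFinset := by
          simp only [List.mem_toFinset, List.mem_cons]
          rintro (rfl | hz)
          · exact hne rfl
          · exact absurd rfl (ne_of_lt (lt_of_lt_of_le (lt_of_le_of_ne hxy hne) (hyu x hz)))
        have hcard : ((x :: y :: u).toFinset.card : Int) = ((y :: u).toFinset.card : Int) + 1 := by
          rw [List.toFinset_cons, Finset.card_insert_of_notMem hnotmem]; push_cast; ring
        have hp : (decide (x != y) = true) := by simp [hne]
        rw [hcard, ← ih']
        simp [hne]
        ring

-- B's sort-then-scan count equals the length of A's first-occurrence dedup list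
theorem pv_distinctCount_eq (xs : List String) :
    pvDistinctCount xs = ((PySem.Set.ofList xs).length : Int) := by
  unfold pvDistinctCount
  rw [pv_chain_count (PySem.List.sorted xs (fun x => x) false)
        (PySem.List.sorted_pairwise xs (fun x => x)),
      List.toFinset_eq_of_perm _ _ (PySem.List.sorted_perm xs (fun x => x) false),
      pv_ofList_length]

-- ===== VERDICT (by name: the statement is the Claim_ definition above) =====
theorem compute_3d_context_statistics_spec : Claim_equal_compute_3d_context_statistics := by
  intro context _ hpre
  unfold Spec_compute_3d_context_statistics
  unfold compute_3d_context_statistics compute_3d_context_statistics_alt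
  rw [pv_outer]
  have hsz := pv_hidden_size context PySem.Dict.empty
      (fun p _ => PySem.Dict.contains_empty p.1) hpre
  simp only [hsz]
  rw [pv_distinctCount_eq, pv_distinctCount_eq]
  have hattrs : context.foldl (fun s p => p.2.foldl (fun s q => PySem.Set.add s q.1) s) []
      = PySem.Set.ofList ((context.flatMap (fun p => p.2)).map (fun q => q.1)) := by
    rw [PySem.Set.ofList_eq_foldl, List.foldl_map, List.foldl_flatMap]
  have hconds : context.foldl (fun s p => p.2.foldl (fun s q => q.2.foldl PySem.Set.add s) s) []
      = PySem.Set.ofList ((context.flatMap (fun p => p.2)).flatMap (fun q => q.2)) := by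
    rw [PySem.Set.ofList_eq_foldl, List.foldl_flatMap, List.foldl_flatMap]
  have hrel : ((context.flatMap (fun p => p.2)).map (fun q => (q.2.length : Int))).sum
      = (context.map (fun p => (p.2.map (fun q => (q.2.length : Int))).sum)).sum := by
    rw [List.map_flatMap, List.flatMap, List.sum_flatten, List.map_map]; rfl
  rw [hattrs, hconds, ← hrel]
  simp [List.countP_eq_length_filter, PySem.Dict.empty]
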